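-- pv_equiv track=rewrite | github.com/Maxwell-Hunt/Canadian-Computing-Competition-CCC-Solutions | CCC/2020Junior/2020j4.py | getCyclicShifts
-- ===== SOURCE A (Python) =====
-- def getCyclicShifts(s):
--     arr = []
--     for i in range(len(s)):
--         arr.append(s)
--         f = s[0]
--         s = s[1:]
--         s += f
--     return arr
-- ===== SOURCE B (Python) =====
-- def getCyclicShifts(s):
--     return [s[i:] + s[:i] for i in range(len(s))]
-- ===== Notes on version B (the rewrite author's own statement) =====
-- stated objective: simpler
-- what changed: Replaces the stateful loop that repeatedly peels the first character and re-appends it (mutating s across iterations) with a one-line comprehension computing each shift directly as s[i:] + s[:i] from the fixed original string.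
import Mathlib
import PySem

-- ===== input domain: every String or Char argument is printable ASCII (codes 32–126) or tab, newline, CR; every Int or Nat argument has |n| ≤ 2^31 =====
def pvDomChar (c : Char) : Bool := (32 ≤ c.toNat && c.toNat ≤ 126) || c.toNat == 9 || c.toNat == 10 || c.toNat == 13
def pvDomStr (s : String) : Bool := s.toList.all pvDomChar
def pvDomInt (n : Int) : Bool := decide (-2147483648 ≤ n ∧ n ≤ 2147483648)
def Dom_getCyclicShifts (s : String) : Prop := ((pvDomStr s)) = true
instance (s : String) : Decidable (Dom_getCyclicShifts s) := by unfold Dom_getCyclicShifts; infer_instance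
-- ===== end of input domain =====

-- B replaces A's stateful peel-and-append rotation loop by a one-line direct slice s[i:] + s[:i] per index (simpler decomposition, same cost).


-- ===== PORT A =====
-- one loop body: f = s[0]; s = s[1:]; s += f   (s[0] never raises inside the loop: s stays nonempty there)
def pvStepA (cs : List Char) : List Char :=
  PySem.Chars.slice cs (some 1) none ++ (PySem.Chars.pyGet? cs 0).toList

def getCyclicShifts (s : String) : List String :=
  ((PySem.List.pyRange 0 (PySem.Str.len s) 1).foldl
    (fun (st : List String × List Char) _ =>
      (st.1 ++ [String.ofList st.2], pvStepA st.2))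
    ([], s.toList)).1

-- ===== PORT B =====
def getCyclicShifts_alt (s : String) : List String :=
  (PySem.List.pyRange 0 (PySem.Str.len s) 1).map
    (fun i => String.ofList
      (PySem.Chars.slice s.toList (some i) none ++ PySem.Chars.slice s.toList none (some i)))

-- ===== PRECONDITION & SPEC =====
def Spec_getCyclicShifts (s : String) (out : List String) : Prop := out = getCyclicShifts_alt s
instance (s : String) (out : List String) : Decidable (Spec_getCyclicShifts s out) := by unfold Spec_getCyclicShifts; infer_instance

-- ===== CLAIM (what is proved, stated in full; the proofs are below) =====
def Claim_equal_getCyclicShifts : Prop := ∀ (s : String), Dom_getCyclicShifts s → Spec_getCyclicShifts s (getCyclicShifts s)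

-- ===== LEMMAS AND PROOFS =====

-- a foldl whose body ignores the element is iteration, |l| times
theorem pv_foldl_const {α β : Type} (g : β → β) (l : List α) (init : β) :
    l.foldl (fun st _ => g st) init = g^[l.length] init := by
  induction l generalizing init with
  | nil => rfl
  | cons x xs ih => simp [List.foldl_cons, ih, Function.iterate_succ_apply]

-- one step of A's loop advances the rotation by one
theorem pv_stepA_rot (cs : List Char) (k : Nat) (hk : k < cs.length) :
    pvStepA (cs.drop k ++ cs.take k) = cs.drop (k + 1) ++ cs.take (k + 1) := by
  unfold pvStepA
  have hne : cs.drop k ≠ [] := by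
    intro h; have := List.drop_eq_nil_iff.mp h; omega
  obtain ⟨c, rest, hcr⟩ := List.exists_cons_of_ne_nil hne
  have hc : cs[k] = c := by
    have : (cs.drop k)[0]'(by simp [hcr]) = c := by simp [hcr]
    simpa [List.getElem_drop] using this
  have hdrop : cs.drop (k + 1) = rest := by
    rw [← List.tail_drop, hcr]; rfl
  have htake : cs.take (k + 1) = cs.take k ++ [c] := by
    rw [List.take_add_one]
    simp [List.getElem?_eq_getElem hk, hc]
  simp [PySem.Chars.slice_eq_listSlice, PySem.List.slice_from_one, hcr, hdrop, htake,
    PySem.Chars.pyGet?_eq_listPyGet?, PySem.List.pyGet?_zero]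

-- A's loop iterated n more times from the k-rotation
theorem pv_iterA (cs : List Char) (n : Nat) :
    ∀ (k : Nat) (arr : List String), k + n ≤ cs.length →
    (fun (st : List String × List Char) => (st.1 ++ [String.ofList st.2], pvStepA st.2))^[n]
        (arr, cs.drop k ++ cs.take k) =
      (arr ++ (List.range n).map
          (fun j => String.ofList (cs.drop (k + j) ++ cs.take (k + j))),
       cs.drop (k + n) ++ cs.take (k + n)) := by
  induction n with
  | zero => intro k arr _; simp
  | succ n ih =>
    intro k arr h
    rw [Function.iterate_succ_apply]
    have hk : k < cs.length := by omega
    simp only [pv_stepA_rot cs k hk]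
    rw [ih (k + 1) (arr ++ [String.ofList (cs.drop k ++ cs.take k)]) (by omega)]
    rw [List.range_succ_eq_map]
    have hfun : (fun j => String.ofList (cs.drop (k + 1 + j) ++ cs.take (k + 1 + j)))
        = fun j => String.ofList (cs.drop (k + (j + 1)) ++ cs.take (k + (j + 1))) := by
      funext j; rw [show k + 1 + j = k + (j + 1) from by omega]
    simp only [List.map_cons, List.map_map, Function.comp_def, Nat.add_zero,
      List.append_assoc, List.singleton_append, hfun]
    rw [show k + 1 + n = k + (n + 1) from by omega]

-- ===== VERDICT (by name: the statement is the Claim_ definition above) =====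
theorem getCyclicShifts_spec : Claim_equal_getCyclicShifts := by
  intro s _
  unfold Spec_getCyclicShifts getCyclicShifts getCyclicShifts_alt
  rw [pv_foldl_const]
  have hlen : (PySem.List.pyRange 0 (PySem.Str.len s) 1).length = s.toList.length := by
    simp [PySem.List.length_pyRange_one, PySem.Str.len_eq]
  rw [hlen]
  have hiter := pv_iterA s.toList s.toList.length 0 [] (by omega)
  simp only [List.drop_zero, List.take_zero, List.append_nil, Nat.zero_add,
    List.nil_append] at hiter
  rw [hiter]
  simp [PySem.List.pyRange_one, PySem.Str.len_eq, List.map_map, Function.comp_def,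
    PySem.Chars.slice_eq_listSlice, PySem.List.slice_from_natCast, PySem.List.slice_to_natCast]
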